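-- pv_equiv track=rewrite | github.com/ksparavec/traceroute_simulator | archive/web/cgi-bin/lib/port_parser.py | format_port_list
-- ===== SOURCE A (Python) =====
-- from typing import List, Tuple, Optional, Dict
--
-- def format_port_list(ports: List[Tuple[int, str]]) -> str:
--     """Format list of ports for display
--
--     Args:
--         ports: List of (port, protocol) tuples
--
--     Returns:
--         Formatted string representation
--     """
--     if not ports:
--         return ""
--
--     # Group consecutive ports with same protocol
--     formatted = []
--     current_range = []
--     current_protocol = None
--
--     for port, protocol in sorted(ports):
--         if current_protocol == protocol and current_range:
--             if port == current_range[-1] + 1: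
--                 current_range.append(port)
--             else:
--                 # End current range
--                 if len(current_range) > 2:
--                     formatted.append(f"{current_range[0]}-{current_range[-1]}/{current_protocol}")
--                 else:
--                     for p in current_range:
--                         formatted.append(f"{p}/{current_protocol}")
--                 current_range = [port]
--         else:
--             # Finish previous range
--             if current_range:
--                 if len(current_range) > 2:
--                     formatted.append(f"{current_range[0]}-{current_range[-1]}/{current_protocol}")
--                 else:
--                     for p in current_range:
--                         formatted.append(f"{p}/{current_protocol}")
--             # Start new range
--             current_range = [port]
--             current_protocol = protocol
--
--     # Handle final range
--     if current_range:
--         if len(current_range) > 2: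
--             formatted.append(f"{current_range[0]}-{current_range[-1]}/{current_protocol}")
--         else:
--             for p in current_range:
--                 formatted.append(f"{p}/{current_protocol}")
--
--     return ','.join(formatted)
-- ===== SOURCE B (Python) =====
-- def format_port_list(ports):
--     """Format list of ports for display
--
--     Args:
--         ports: List of (port, protocol) tuples
--
--     Returns:
--         Formatted string representation
--     """
--     xs = sorted(ports)
--     n = len(xs)
--     # Boundary indices: position i starts a new block when it is the first
--     # element, the protocol changes, or the port is not the predecessor + 1.
--     cuts = [i for i in range(n)
--             if i == 0 or xs[i - 1][1] != xs[i][1] or xs[i][0] != xs[i - 1][0] + 1] + [n]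
--     parts = []
--     for a, b in zip(cuts, cuts[1:]):
--         proto = xs[a][1]
--         if b - a > 2:
--             parts.append(f"{xs[a][0]}-{xs[b - 1][0]}/{proto}")
--         else:
--             parts.extend(f"{p}/{proto}" for p, _ in xs[a:b])
--     return ','.join(parts)
-- ===== Notes on version B (the rewrite author's own statement) =====
-- stated objective: alternative
-- what changed: Replaces A's stateful run accumulator (pending range list, pending protocol, three duplicated flush blocks) with a declarative boundary-index formulation: a comprehension over range(n) marks the indices where a block starts (first element, protocol change, or non-+1 port step), and each adjacent pair of boundary indices is formatted directly from the sorted list by index arithmetic and one slice.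
import Mathlib
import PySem

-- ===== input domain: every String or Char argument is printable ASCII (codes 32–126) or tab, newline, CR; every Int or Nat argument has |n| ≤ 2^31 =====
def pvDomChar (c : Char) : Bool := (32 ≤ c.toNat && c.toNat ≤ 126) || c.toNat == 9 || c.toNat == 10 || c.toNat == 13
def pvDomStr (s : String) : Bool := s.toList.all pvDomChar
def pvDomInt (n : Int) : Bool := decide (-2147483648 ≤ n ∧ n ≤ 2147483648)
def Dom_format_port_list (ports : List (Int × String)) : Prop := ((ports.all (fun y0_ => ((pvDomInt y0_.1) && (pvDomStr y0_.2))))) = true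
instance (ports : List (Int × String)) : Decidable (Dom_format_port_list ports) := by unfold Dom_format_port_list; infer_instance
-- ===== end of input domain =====

-- B replaces A's stateful run accumulator with a boundary-index formulation
-- (break indices over range(n), then format each index interval); objective: alternative.

-- ===== PORT A =====
-- A's range-flushing block, used three times in A's loop (current_protocol is
-- always a string when this runs; the "" default for None is unreachable).
def pvEmitA (cur : List Int) (proto : String) : List String :=
  if cur.length > 2 then
    [PySem.Int.toStr (cur.headD 0) ++ "-" ++ PySem.Int.toStr (cur.getLastD 0) ++ "/" ++ proto]
  else
    cur.map (fun p => PySem.Int.toStr p ++ "/" ++ proto)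

-- A's for-loop over sorted(ports), state (formatted, current_range, current_protocol)
def pvLoopA : List String → List Int → Option String → List (Int × String) → List String
  | formatted, cur, protoOpt, [] =>
    -- final "if current_range:" flush
    if cur ≠ [] then formatted ++ pvEmitA cur (protoOpt.getD "") else formatted
  | formatted, cur, protoOpt, (port, protocol) :: rest =>
    if protoOpt == some protocol && cur ≠ [] then
      if port == cur.getLastD 0 + 1 then
        pvLoopA formatted (cur ++ [port]) protoOpt rest
      else
        pvLoopA (formatted ++ pvEmitA cur (protoOpt.getD "")) [port] protoOpt rest
    else
      pvLoopA (if cur ≠ [] then formatted ++ pvEmitA cur (protoOpt.getD "") else formatted)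
        [port] (some protocol) rest

def format_port_list (ports : List (Int × String)) : String :=
  if ports = [] then ""
  else String.intercalate ","
    (pvLoopA [] [] none (PySem.List.sorted2 ports (fun x => x.1) (fun x => x.2)))

-- ===== PORT B =====
-- B's break condition: does a new block start at index i of xs?
-- (indices are in range whenever the condition is evaluated; pyGetD supplies the default)
def pvBrkI (xs : List (Int × String)) (i : Int) : Bool :=
  (i == 0)
  || ((PySem.List.pyGetD xs (i - 1) (0, "")).2 != (PySem.List.pyGetD xs i (0, "")).2)
  || ((PySem.List.pyGetD xs i (0, "")).1 != (PySem.List.pyGetD xs (i - 1) (0, "")).1 + 1)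

-- B's comprehension: cuts = [i for i in range(n) if <break>] + [n]
def pvCutsI (xs : List (Int × String)) : List Int :=
  ((PySem.List.pyRange 0 (xs.length : Int) 1).filter (fun i => pvBrkI xs i)) ++ [(xs.length : Int)]

-- B's loop body: the strings contributed by the block xs[a:b]
def pvPartI (xs : List (Int × String)) (ab : Int × Int) : List String :=
  let proto := (PySem.List.pyGetD xs ab.1 (0, "")).2
  if ab.2 - ab.1 > 2 then
    [PySem.Int.toStr (PySem.List.pyGetD xs ab.1 (0, "")).1 ++ "-"
      ++ PySem.Int.toStr (PySem.List.pyGetD xs (ab.2 - 1) (0, "")).1 ++ "/" ++ proto]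
  else
    (PySem.List.slice xs (some ab.1) (some ab.2)).map (fun e => PySem.Int.toStr e.1 ++ "/" ++ proto)

def format_port_list_alt (ports : List (Int × String)) : String :=
  let xs := PySem.List.sorted2 ports (fun x => x.1) (fun x => x.2)
  let cuts := pvCutsI xs
  String.intercalate ","
    ((cuts.zip (PySem.List.slice cuts (some 1) none)).flatMap (pvPartI xs))

-- ===== PRECONDITION & SPEC =====
def Spec_format_port_list (ports : List (Int × String)) (out : String) : Prop := out = format_port_list_alt ports
instance (ports : List (Int × String)) (out : String) : Decidable (Spec_format_port_list ports out) := by unfold Spec_format_port_list; infer_instance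

-- ===== CLAIM (what is proved, stated in full; the proofs are below) =====
def Claim_equal_format_port_list : Prop := ∀ (ports : List (Int × String)), Dom_format_port_list ports → Spec_format_port_list ports (format_port_list ports)

-- ===== LEMMAS AND PROOFS =====

-- Proof-only intermediate: maximal consecutive runs (used to relate both ports).
def pvTakeRun : Int → String → List (Int × String) → List Int × List (Int × String)
  | _, _, [] => ([], [])
  | prev, proto, (p, q) :: rest =>
    if q = proto ∧ p = prev + 1 then
      let pr := pvTakeRun p proto rest
      (p :: pr.1, pr.2)
    else ([], (p, q) :: rest)

lemma pvTakeRun_len (prev : Int) (proto : String) (xs : List (Int × String)) :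
    (pvTakeRun prev proto xs).2.length ≤ xs.length := by
  induction xs generalizing prev with
  | nil => simp [pvTakeRun]
  | cons x rest ih =>
    obtain ⟨p, q⟩ := x
    simp only [pvTakeRun]
    split
    · exact le_trans (ih p) (Nat.le_succ _)
    · simp

def pvRuns : List (Int × String) → List (List Int × String)
  | [] => []
  | (p, q) :: rest =>
    let pr := pvTakeRun p q rest
    (p :: pr.1, q) :: pvRuns pr.2
termination_by xs => xs.length
decreasing_by
  exact Nat.lt_succ_of_le (pvTakeRun_len p q rest)

def pvFmtRun (run : List Int × String) : List String :=
  if run.1.length > 2 then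
    [PySem.Int.toStr (run.1.headD 0) ++ "-" ++ PySem.Int.toStr (run.1.getLastD 0) ++ "/" ++ run.2]
  else
    run.1.map (fun p => PySem.Int.toStr p ++ "/" ++ run.2)

lemma pvFmtRun_eq (l : List Int) (s : String) : pvFmtRun (l, s) = pvEmitA l s := rfl

-- A-SIDE: A's loop from a nonempty current range equals "finish this run, then the rest of the runs"
lemma pvLoopA_eq (xs : List (Int × String)) :
    ∀ (formatted : List String) (cur : List Int) (proto : String), cur ≠ [] →
    pvLoopA formatted cur (some proto) xs =
      formatted ++ pvEmitA (cur ++ (pvTakeRun (cur.getLastD 0) proto xs).1) proto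
        ++ (pvRuns (pvTakeRun (cur.getLastD 0) proto xs).2).flatMap pvFmtRun := by
  induction xs with
  | nil =>
    intro formatted cur proto hcur
    simp [pvLoopA, pvTakeRun, pvRuns, hcur]
  | cons x rest ih =>
    intro formatted cur proto hcur
    obtain ⟨p, q⟩ := x
    by_cases hq : q = proto
    · subst hq
      have h1 : ((some q : Option String) == some q && decide (cur ≠ [])) = true := by
        simp [hcur]
      by_cases hp : p = cur.getLastD 0 + 1
      · -- extend the run
        have h2 : (p == cur.getLastD 0 + 1) = true := by simp [hp]
        have hp' : p = cur.getLast?.getD 0 + 1 := by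
          rw [← List.getLastD_eq_getLast?]; exact hp
        simp only [pvLoopA, h1, if_true, h2]
        rw [ih formatted (cur ++ [p]) q (by simp)]
        simp [pvTakeRun, hp', List.append_assoc]
      · -- same protocol, gap: flush and restart
        have h2 : (p == cur.getLastD 0 + 1) = false := by
          rw [List.getLastD_eq_getLast?] at hp; simp [hp]
        simp only [pvLoopA, h1, if_true, h2, Bool.false_eq_true, if_false]
        rw [ih (formatted ++ pvEmitA cur ((some q : Option String).getD "")) [p] q (by simp)]
        have hp' : ¬ p = cur.getLast?.getD 0 + 1 := by
          rw [← List.getLastD_eq_getLast?]; exact hp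
        rw [show pvTakeRun (cur.getLastD 0) q ((p, q) :: rest) = ([], (p, q) :: rest) from by
          simp [pvTakeRun, hp']]
        simp only [pvRuns]
        simp [pvFmtRun_eq]
    · -- protocol change: flush and restart
      have h1 : ((some proto : Option String) == some q && decide (cur ≠ [])) = false := by
        simp only [Bool.and_eq_false_iff]
        left; exact decide_eq_false (fun h => hq h.symm)
      simp only [pvLoopA, h1, Bool.false_eq_true, if_false, if_pos hcur]
      rw [ih (formatted ++ pvEmitA cur ((some proto : Option String).getD "")) [p] q (by simp)]
      rw [show pvTakeRun (cur.getLastD 0) proto ((p, q) :: rest) = ([], (p, q) :: rest) from by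
        simp [pvTakeRun, hq]]
      simp only [pvRuns]
      simp [pvFmtRun_eq]

-- B-SIDE: Nat-level versions of B's index computations
def pvBrkN (xs : List (Int × String)) (j : Nat) : Bool :=
  (j == 0)
  || ((xs.getD (j - 1) (0, "")).2 != (xs.getD j (0, "")).2)
  || ((xs.getD j (0, "")).1 != (xs.getD (j - 1) (0, "")).1 + 1)

def pvCutsN (xs : List (Int × String)) : List Nat :=
  ((List.range xs.length).filter (pvBrkN xs)) ++ [xs.length]

def pvPartN (xs : List (Int × String)) (a b : Nat) : List String :=
  let proto := (xs.getD a (0, "")).2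
  if b - a > 2 then
    [PySem.Int.toStr (xs.getD a (0, "")).1 ++ "-"
      ++ PySem.Int.toStr (xs.getD (b - 1) (0, "")).1 ++ "/" ++ proto]
  else
    ((xs.drop a).take (b - a)).map (fun e => PySem.Int.toStr e.1 ++ "/" ++ proto)

lemma pvBrkI_cast (xs : List (Int × String)) (j : Nat) : pvBrkI xs (Int.ofNat j) = pvBrkN xs j := by
  cases j with
  | zero => simp [pvBrkI, pvBrkN]
  | succ m =>
    have h1 : (Int.ofNat (m+1)) - 1 = ((m : Nat) : Int) := by
      simp [Int.ofNat_eq_natCast]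
    have h0 : (Int.ofNat (m+1) == 0) = false := by
      simp [Int.ofNat_eq_natCast]; omega
    unfold pvBrkI pvBrkN
    rw [h1, h0]
    have h2 : Int.ofNat (m+1) = ((m+1 : Nat) : Int) := rfl
    rw [h2, PySem.List.pyGetD_natCast, PySem.List.pyGetD_natCast]
    simp [List.getD_eq_getElem?_getD]

lemma pyRange_cast (n : Nat) :
    PySem.List.pyRange 0 (n:Int) 1 = List.map Int.ofNat (List.range n) := by
  rw [PySem.List.pyRange_one]
  simp only [zero_add, sub_zero, Int.toNat_natCast]
  induction n with
  | zero => rfl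
  | succ m ih => rw [List.range_succ]; simp [ih]

lemma pvCutsI_cast (xs : List (Int × String)) :
    pvCutsI xs = List.map Int.ofNat (pvCutsN xs) := by
  unfold pvCutsI pvCutsN
  rw [pyRange_cast, List.filter_map, List.map_append]
  congr 2
  apply List.filter_congr
  intro j _
  simpa using pvBrkI_cast xs j

lemma pvPartI_cast (xs : List (Int × String)) (a b : Nat) (hab : a < b) :
    pvPartI xs (Int.ofNat a, Int.ofNat b) = pvPartN xs a b := by
  unfold pvPartI pvPartN
  simp only [Int.ofNat_eq_natCast]
  have hb1 : ((b:Int)) - 1 = ((b-1 : Nat) : Int) := by omega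
  have hcmp : ((b:Int) - (a:Int) > 2) ↔ (b - a > 2) := by omega
  rw [hb1, PySem.List.pyGetD_natCast, PySem.List.pyGetD_natCast, PySem.List.slice_natCast]
  simp only [List.getD_eq_getElem?_getD]
  split_ifs with h1 h2 h2
  · rfl
  · exact absurd (hcmp.mp h1) h2
  · exact absurd (hcmp.mpr h2) h1
  · rfl

-- structure of pvTakeRun
lemma pvTakeRun_spec (prev : Int) (proto : String) (ys : List (Int × String)) :
    ys = ((pvTakeRun prev proto ys).1.map (fun r => (r, proto))) ++ (pvTakeRun prev proto ys).2
    ∧ (∀ i (h : i < (pvTakeRun prev proto ys).1.length),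
        (pvTakeRun prev proto ys).1[i] = prev + 1 + i)
    ∧ (∀ z ∈ (pvTakeRun prev proto ys).2.head?,
        ¬(z.2 = proto ∧ z.1 = prev + (pvTakeRun prev proto ys).1.length + 1)) := by
  induction ys generalizing prev with
  | nil => simp [pvTakeRun]
  | cons x rest ih =>
    obtain ⟨p, q⟩ := x
    by_cases h : q = proto ∧ p = prev + 1
    · obtain ⟨hq, hp⟩ := h
      obtain ⟨ih1, ih2, ih3⟩ := ih p
      refine ⟨?_, ?_, ?_⟩
      · simp only [pvTakeRun, if_pos (And.intro hq hp)]
        subst hq hp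
        simpa using ih1
      · intro i hi
        simp only [pvTakeRun, if_pos (And.intro hq hp)] at hi ⊢
        cases i with
        | zero => simpa using hp
        | succ m =>
          simp only [List.getElem_cons_succ]
          rw [ih2 m (by simpa using hi), hp]
          push_cast; ring
      · intro z hz
        simp only [pvTakeRun, if_pos (And.intro hq hp)] at hz ⊢
        have := ih3 z hz
        intro hc
        apply this
        refine ⟨hc.1, ?_⟩
        rw [hc.2, hp]
        simp; ring
    · refine ⟨?_, ?_, ?_⟩
      · simp [pvTakeRun, if_neg h]
      · intro i hi
        simp [pvTakeRun, if_neg h] at hi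
      · intro z hz
        simp only [pvTakeRun, if_neg h] at hz ⊢
        simp at hz
        subst hz
        simpa using h

-- index access into (p,q)::rest along the first run, and past it
lemma pvGetF (p : Int) (q : String) (rest : List (Int × String)) :
    ∀ j : Nat, j ≤ (pvTakeRun p q rest).1.length →
      ((p,q)::rest).getD j (0,"") = (p + (j:Int), q) := by
  obtain ⟨h1, h2, _⟩ := pvTakeRun_spec p q rest
  intro j hj
  cases j with
  | zero => simp
  | succ m =>
    have hm : m < (pvTakeRun p q rest).1.length := by omega
    have hmap : m < ((pvTakeRun p q rest).1.map (fun r => (r, q))).length := by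
      simpa using hm
    rw [List.getD_cons_succ, List.getD_eq_getElem?_getD]
    conv_lhs => rw [h1]
    rw [List.getElem?_append_left hmap]
    rw [List.getElem?_eq_getElem hmap]
    simp only [List.getElem_map, Option.getD_some]
    rw [h2 m hm]
    refine Prod.ext ?_ rfl
    push_cast; ring

lemma pvGetS (p : Int) (q : String) (rest : List (Int × String)) :
    ∀ j : Nat, ((p,q)::rest).getD ((pvTakeRun p q rest).1.length + 1 + j) (0,"")
      = (pvTakeRun p q rest).2.getD j (0,"") := by
  obtain ⟨h1, _, _⟩ := pvTakeRun_spec p q rest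
  intro j
  set run := (pvTakeRun p q rest).1 with hrun
  set rest' := (pvTakeRun p q rest).2 with hrest'
  have hidx : run.length + 1 + j = (run.length + j) + 1 := by omega
  rw [hidx, List.getD_cons_succ, List.getD_eq_getElem?_getD, List.getD_eq_getElem?_getD]
  conv_lhs => rw [h1]
  have hlen : (run.map (fun r => (r, q))).length ≤ run.length + j := by simp
  rw [List.getElem?_append_right hlen]
  congr 1
  simp

lemma pvLen_cons (p : Int) (q : String) (rest : List (Int × String)) :
    ((p,q)::rest).length = ((pvTakeRun p q rest).1.length + 1) + (pvTakeRun p q rest).2.length := by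
  obtain ⟨h1, _, _⟩ := pvTakeRun_spec p q rest
  have := congrArg List.length h1
  simp at this
  simp [this]
  omega

lemma pvBrk_zero (ys : List (Int × String)) : pvBrkN ys 0 = true := by
  simp [pvBrkN]

lemma pvBrk_mid (p : Int) (q : String) (rest : List (Int × String)) (j : Nat)
    (h1 : 1 ≤ j) (h2 : j ≤ (pvTakeRun p q rest).1.length) :
    pvBrkN ((p,q)::rest) j = false := by
  unfold pvBrkN
  rw [pvGetF p q rest j h2, pvGetF p q rest (j-1) (by omega)]
  have hj : (j : Int) = ((j-1 : Nat) : Int) + 1 := by omega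
  have hj0 : (j == 0) = false := by simp; omega
  simp [hj0, hj]
  ring

lemma pvBrk_boundary (p : Int) (q : String) (rest : List (Int × String))
    (hne : (pvTakeRun p q rest).2 ≠ []) :
    pvBrkN ((p,q)::rest) ((pvTakeRun p q rest).1.length + 1) = true := by
  obtain ⟨z, w, hzw⟩ := List.exists_cons_of_ne_nil hne
  obtain ⟨_, _, h3⟩ := pvTakeRun_spec p q rest
  have hz : ¬(z.2 = q ∧ z.1 = p + (pvTakeRun p q rest).1.length + 1) := by
    apply h3
    rw [hzw]; simp
  unfold pvBrkN
  have e1 : ((p,q)::rest).getD ((pvTakeRun p q rest).1.length + 1) (0,"") = z := by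
    have := pvGetS p q rest 0
    rw [hzw] at this
    simpa using this
  have e2 : ((p,q)::rest).getD ((pvTakeRun p q rest).1.length + 1 - 1) (0,"")
      = (p + ((pvTakeRun p q rest).1.length : Int), q) := by
    have : (pvTakeRun p q rest).1.length + 1 - 1 = (pvTakeRun p q rest).1.length := by omega
    rw [this]
    exact pvGetF p q rest _ le_rfl
  rw [e1, e2]
  by_cases hq : z.2 = q
  · have hp : z.1 ≠ p + (pvTakeRun p q rest).1.length + 1 := fun hc => hz ⟨hq, hc⟩
    simp [bne_iff_ne, hq]
    intro hc
    exact absurd hc hp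
  · simp [bne_iff_ne]
    exact Or.inl (fun hqq => hq hqq.symm)

lemma pvBrk_shift (p : Int) (q : String) (rest : List (Int × String)) (j : Nat) (hj : 1 ≤ j) :
    pvBrkN ((p,q)::rest) ((pvTakeRun p q rest).1.length + 1 + j) = pvBrkN (pvTakeRun p q rest).2 j := by
  unfold pvBrkN
  have e1 := pvGetS p q rest j
  have hidx : (pvTakeRun p q rest).1.length + 1 + j - 1 = (pvTakeRun p q rest).1.length + 1 + (j - 1) := by omega
  have e2 := pvGetS p q rest (j-1)
  rw [e1, hidx, e2]
  have z1 : ((pvTakeRun p q rest).1.length + 1 + j == 0) = false := by simp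
  have z2 : (j == 0) = false := by simp; omega
  rw [z1, z2]

-- cuts decomposition along the first run
lemma pvCutsN_cons (p : Int) (q : String) (rest : List (Int × String)) :
    pvCutsN ((p, q) :: rest) =
      0 :: (pvCutsN (pvTakeRun p q rest).2).map (fun j => ((pvTakeRun p q rest).1.length + 1) + j) := by
  have hlen := pvLen_cons p q rest
  unfold pvCutsN
  rw [hlen, List.range_add, List.filter_append, List.filter_map]
  have hfirst : (List.range ((pvTakeRun p q rest).1.length + 1)).filter (pvBrkN ((p,q)::rest)) = [0] := by
    rw [Nat.add_comm, List.range_add, List.filter_append, List.filter_map]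
    have h0 : (List.range 1).filter (pvBrkN ((p,q)::rest)) = [0] := by
      simp [List.range_succ, pvBrk_zero]
    have hmid : (List.range (pvTakeRun p q rest).1.length).filter
        (pvBrkN ((p,q)::rest) ∘ (fun x => 1 + x)) = [] := by
      rw [List.filter_eq_nil_iff]
      intro i hi
      simp only [Function.comp_apply]
      rw [pvBrk_mid p q rest (1 + i) (by omega) (by simp at hi; omega)]
      simp
    rw [h0, hmid]
    simp
  have hsecond : (List.range (pvTakeRun p q rest).2.length).filter
      (pvBrkN ((p,q)::rest) ∘ (fun x => ((pvTakeRun p q rest).1.length + 1) + x))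
    = (List.range (pvTakeRun p q rest).2.length).filter (pvBrkN (pvTakeRun p q rest).2) := by
    apply List.filter_congr
    intro i hi
    simp only [Function.comp_apply]
    cases i with
    | zero =>
      have hm : (pvTakeRun p q rest).2 ≠ [] := by
        intro hc
        simp [hc] at hi
      rw [Nat.add_zero, pvBrk_boundary p q rest hm, pvBrk_zero]
    | succ n =>
      exact pvBrk_shift p q rest (n+1) (by omega)
  rw [hfirst, hsecond]
  simp [List.map_append]

lemma pvCutsN_head (ys : List (Int × String)) : ∃ t, pvCutsN ys = 0 :: t := by
  cases ys with
  | nil => exact ⟨[], rfl⟩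
  | cons x rest =>
    obtain ⟨p, q⟩ := x
    rw [pvCutsN_cons]
    exact ⟨_, rfl⟩

lemma pvZipTailRel {α : Type} {R : α → α → Prop} :
    ∀ (l : List α), l.Pairwise R → ∀ p ∈ l.zip l.tail, R p.1 p.2
  | [], _, p, hp => by simp at hp
  | [a], _, p, hp => by simp at hp
  | a :: b :: t, hpw, p, hp => by
    simp only [List.tail_cons, List.zip_cons_cons, List.mem_cons] at hp
    rcases hp with h | h
    · subst h
      exact List.rel_of_pairwise_cons hpw (by simp)
    · exact pvZipTailRel (b :: t) hpw.tail p (by simpa using h)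

lemma pvCutsN_sorted (ys : List (Int × String)) : (pvCutsN ys).Pairwise (· < ·) := by
  unfold pvCutsN
  rw [List.pairwise_append]
  refine ⟨List.Pairwise.sublist List.filter_sublist List.pairwise_lt_range, by simp, ?_⟩
  intro a ha b hb
  simp at hb
  subst hb
  have := List.mem_range.mp (List.mem_of_mem_filter ha)
  exact this

lemma pvCutsN_le (ys : List (Int × String)) (b : Nat) (hb : b ∈ pvCutsN ys) : b ≤ ys.length := by
  unfold pvCutsN at hb
  rcases List.mem_append.mp hb with h | h
  · exact le_of_lt (List.mem_range.mp (List.mem_of_mem_filter h))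
  · simp at h; omega

lemma pvCutsN_pairs (ys : List (Int × String)) (a b : Nat)
    (h : (a, b) ∈ (pvCutsN ys).zip (pvCutsN ys).tail) : a < b ∧ b ≤ ys.length := by
  refine ⟨pvZipTailRel _ (pvCutsN_sorted ys) _ h, ?_⟩
  have := (List.of_mem_zip h).2
  exact pvCutsN_le ys b (List.mem_of_mem_tail this)

lemma pvFlatMap_congr {α β : Type} (l : List α) (f g : α → List β)
    (h : ∀ x ∈ l, f x = g x) : l.flatMap f = l.flatMap g := by
  simp only [List.flatMap]
  rw [List.map_congr_left h]

-- first interval = first run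
lemma pvPart_head (p : Int) (q : String) (rest : List (Int × String)) :
    pvPartN ((p,q)::rest) 0 ((pvTakeRun p q rest).1.length + 1)
      = pvFmtRun (p :: (pvTakeRun p q rest).1, q) := by
  obtain ⟨h1, h2, _⟩ := pvTakeRun_spec p q rest
  unfold pvPartN pvFmtRun
  have hg0 : ((p,q)::rest).getD 0 (0,"") = (p, q) := rfl
  have hcond : ((pvTakeRun p q rest).1.length + 1 - 0 > 2)
      ↔ ((p :: (pvTakeRun p q rest).1).length > 2) := by simp
  rw [hg0]
  split_ifs with hc1 hc2 hc2
  · -- range case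
    have hglast : ((p,q)::rest).getD ((pvTakeRun p q rest).1.length + 1 - 1) (0,"")
        = (p + ((pvTakeRun p q rest).1.length : Int), q) := by
      have : (pvTakeRun p q rest).1.length + 1 - 1 = (pvTakeRun p q rest).1.length := by omega
      rw [this]; exact pvGetF p q rest _ le_rfl
    rw [hglast]
    have hlast : (p :: (pvTakeRun p q rest).1).getLastD 0
        = p + ((pvTakeRun p q rest).1.length : Int) := by
      rcases hrn : (pvTakeRun p q rest).1 with _ | ⟨r, rs⟩
      · simp
      · rw [← hrn]
        have hne : (pvTakeRun p q rest).1 ≠ [] := by rw [hrn]; simp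
        rw [List.getLastD_cons, List.getLastD_eq_getLast?, List.getLast?_eq_getElem?]
        have hl : (pvTakeRun p q rest).1.length - 1 < (pvTakeRun p q rest).1.length := by
          rw [hrn]; simp
        rw [List.getElem?_eq_getElem hl, h2 _ hl]
        simp only [Option.getD_some]
        have : (pvTakeRun p q rest).1.length ≠ 0 := by rw [hrn]; simp
        omega
    rw [hlast]
    simp
  · exact absurd (hcond.mp hc1) hc2
  · exact absurd (hcond.mpr hc2) hc1
  · -- short case: the slice is exactly the first run
    have hys : ((p,q)::rest)
        = ((p,q) :: (pvTakeRun p q rest).1.map (fun r => (r, q))) ++ (pvTakeRun p q rest).2 := by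
      conv_lhs => rw [h1]
      rw [List.cons_append]
    have hklen : ((p,q) :: (pvTakeRun p q rest).1.map (fun r => (r, q))).length
        = (pvTakeRun p q rest).1.length + 1 := by simp
    rw [List.drop_zero, Nat.sub_zero, hys, ← hklen, List.take_left]
    simp

-- shifted interval = interval of the tail list
lemma pvPart_shift (p : Int) (q : String) (rest : List (Int × String)) (a b : Nat)
    (hab : a < b) :
    pvPartN ((p,q)::rest) ((pvTakeRun p q rest).1.length + 1 + a) ((pvTakeRun p q rest).1.length + 1 + b)
      = pvPartN (pvTakeRun p q rest).2 a b := by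
  obtain ⟨h1, _, _⟩ := pvTakeRun_spec p q rest
  unfold pvPartN
  have hga : ((p,q)::rest).getD ((pvTakeRun p q rest).1.length + 1 + a) (0,"")
      = (pvTakeRun p q rest).2.getD a (0,"") := pvGetS p q rest a
  have hgb : ((p,q)::rest).getD ((pvTakeRun p q rest).1.length + 1 + b - 1) (0,"")
      = (pvTakeRun p q rest).2.getD (b-1) (0,"") := by
    have : (pvTakeRun p q rest).1.length + 1 + b - 1 = (pvTakeRun p q rest).1.length + 1 + (b-1) := by
      omega
    rw [this]; exact pvGetS p q rest (b-1)
  have hsub : (pvTakeRun p q rest).1.length + 1 + b - ((pvTakeRun p q rest).1.length + 1 + a)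
      = b - a := by omega
  have hdrop : ((p,q)::rest).drop ((pvTakeRun p q rest).1.length + 1 + a)
      = (pvTakeRun p q rest).2.drop a := by
    have hys : ((p,q)::rest)
        = ((p,q) :: (pvTakeRun p q rest).1.map (fun r => (r, q))) ++ (pvTakeRun p q rest).2 := by
      conv_lhs => rw [h1]
      rw [List.cons_append]
    have hklen : ((p,q) :: (pvTakeRun p q rest).1.map (fun r => (r, q))).length
        = (pvTakeRun p q rest).1.length + 1 := by simp
    rw [hys, ← hklen, List.drop_append]
    simp
  rw [hga, hgb, hsub, hdrop]

-- the main bridge: B's interval formatting equals run-by-run formatting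
lemma pvZipShift (k : Nat) (t0 : List Nat) :
    ((0 :: ((0::t0).map (fun j => k + j))).zip ((0::t0).map (fun j => k + j)))
    = (0, k + 0) :: (((0::t0)).zip ((0::t0).tail)).map (Prod.map (fun j => k + j) (fun j => k + j)) := by
  simp only [List.map_cons, List.zip_cons_cons, List.tail_cons]
  rw [← List.zip_map]
  simp

lemma pvPartsN_eq_aux (n : Nat) : ∀ (ys : List (Int × String)), ys.length ≤ n →
    ((pvCutsN ys).zip (pvCutsN ys).tail).flatMap (fun ab => pvPartN ys ab.1 ab.2)
      = (pvRuns ys).flatMap pvFmtRun := by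
  induction n with
  | zero =>
    intro ys hy
    have : ys = [] := List.length_eq_zero_iff.mp (by omega)
    subst this
    simp [pvCutsN, pvRuns]
  | succ n ih =>
    intro ys hy
    cases ys with
    | nil => simp [pvCutsN, pvRuns]
    | cons x rest =>
      obtain ⟨p, q⟩ := x
      obtain ⟨t, ht⟩ := pvCutsN_head (pvTakeRun p q rest).2
      rw [pvCutsN_cons, ht]
      simp only [List.tail_cons]
      rw [pvZipShift, List.flatMap_cons]
      have hrw : (pvRuns ((p,q)::rest)) = (p :: (pvTakeRun p q rest).1, q) :: pvRuns (pvTakeRun p q rest).2 := by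
        rw [pvRuns]
      rw [hrw, List.flatMap_cons]
      congr 1
      · simpa using pvPart_head p q rest
      · rw [← ht, List.flatMap_map]
        have hcong : ∀ ab ∈ (pvCutsN (pvTakeRun p q rest).2).zip ((pvCutsN (pvTakeRun p q rest).2).tail),
            pvPartN ((p,q)::rest)
              (Prod.map (fun j => ((pvTakeRun p q rest).1.length + 1) + j)
                (fun j => ((pvTakeRun p q rest).1.length + 1) + j) ab).1
              (Prod.map (fun j => ((pvTakeRun p q rest).1.length + 1) + j)
                (fun j => ((pvTakeRun p q rest).1.length + 1) + j) ab).2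
            = pvPartN (pvTakeRun p q rest).2 ab.1 ab.2 := by
          intro ab hab
          obtain ⟨a, b⟩ := ab
          have hp := pvCutsN_pairs _ a b hab
          exact pvPart_shift p q rest a b hp.1
        rw [pvFlatMap_congr _
          (fun a => pvPartN ((p,q)::rest)
            (Prod.map (fun j => ((pvTakeRun p q rest).1.length + 1) + j)
              (fun j => ((pvTakeRun p q rest).1.length + 1) + j) a).1
            (Prod.map (fun j => ((pvTakeRun p q rest).1.length + 1) + j)
              (fun j => ((pvTakeRun p q rest).1.length + 1) + j) a).2)
          (fun ab => pvPartN (pvTakeRun p q rest).2 ab.1 ab.2) hcong]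
        apply ih
        have := pvLen_cons p q rest
        simp at this hy ⊢
        omega

lemma pvPartsN_eq (ys : List (Int × String)) :
    ((pvCutsN ys).zip (pvCutsN ys).tail).flatMap (fun ab => pvPartN ys ab.1 ab.2)
      = (pvRuns ys).flatMap pvFmtRun :=
  pvPartsN_eq_aux ys.length ys le_rfl

-- B's port computes the run-by-run formatting
lemma pvAlt_eq (ports : List (Int × String)) :
    format_port_list_alt ports = String.intercalate ","
      ((pvRuns (PySem.List.sorted2 ports (fun x => x.1) (fun x => x.2))).flatMap pvFmtRun) := by
  unfold format_port_list_alt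
  dsimp only
  set xs := PySem.List.sorted2 ports (fun x => x.1) (fun x => x.2) with hxs
  congr 1
  rw [PySem.List.slice_from_one, pvCutsI_cast]
  have htail : ((pvCutsN xs).map Int.ofNat).tail = ((pvCutsN xs).tail).map Int.ofNat := by
    obtain ⟨t, ht⟩ := pvCutsN_head xs
    rw [ht]; rfl
  rw [htail, List.zip_map, List.flatMap_map]
  rw [pvFlatMap_congr _ _ (fun ab => pvPartN xs ab.1 ab.2) ?_]
  · exact pvPartsN_eq xs
  · intro ab hab
    obtain ⟨a, b⟩ := ab
    have hp := pvCutsN_pairs _ a b hab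
    exact pvPartI_cast xs a b hp.1

-- ===== VERDICT (by name: the statement is the Claim_ definition above) =====
theorem format_port_list_spec : Claim_equal_format_port_list := by
  intro ports _
  unfold Spec_format_port_list
  rw [pvAlt_eq]
  unfold format_port_list
  by_cases hports : ports = []
  · subst hports
    simp [PySem.List.sorted2, pvRuns, String.intercalate]
  · rw [if_neg hports]
    congr 1
    have hperm := PySem.List.sorted2_perm (xs := ports) (k1 := fun x => x.1) (k2 := fun x => x.2) (rev := false)
    cases hs : PySem.List.sorted2 ports (fun x => x.1) (fun x => x.2) with
    | nil =>
      rw [hs] at hperm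
      exact absurd (hperm.symm.eq_nil) hports
    | cons x rest =>
      obtain ⟨p, q⟩ := x
      have h1 : ((none : Option String) == some q && decide (([] : List Int) ≠ [])) = false := by
        simp
      simp only [pvLoopA, h1, Bool.false_eq_true, if_false, if_neg (by simp : ¬([] : List Int) ≠ [])]
      rw [pvLoopA_eq rest [] [p] q (by simp)]
      rw [show pvRuns ((p, q) :: rest) = (p :: (pvTakeRun p q rest).1, q) :: pvRuns (pvTakeRun p q rest).2 from by rw [pvRuns]]
      simp [pvFmtRun_eq]
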